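-- pv_equiv track=rewrite | github.com/diciassettecoltelli-ux/visionlabs-gateway | scripts/run_google_prompt_enhancer.py | _dedupe_intro
-- ===== SOURCE A (Python) =====
-- def _dedupe_intro(prompt: str) -> str:
--     cleaned = " ".join(prompt.strip().split())
--     duplicate_pairs = [
--         ("Ultra-realistic cinematic shot of Ultra-realistic cinematic shot of ", "Ultra-realistic cinematic shot of "),
--         ("Ultra-realistic cinematic still of Ultra-realistic cinematic still of ", "Ultra-realistic cinematic still of "),
--     ]
--     for before, after in duplicate_pairs:
--         while before in cleaned:
--             cleaned = cleaned.replace(before, after)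
--     return cleaned
-- ===== SOURCE B (Python) =====
-- def _collapse_runs(phrase: str, s: str) -> str:
--     """Single left-to-right pass: whenever two consecutive copies of `phrase`
--     start at the current position, skip one copy (re-checking at the kept one);
--     otherwise emit the current character."""
--     double = phrase + phrase
--     out = []
--     i = 0
--     n = len(s)
--     while i < n:
--         if s.startswith(double, i):
--             i += len(phrase)
--         else:
--             out.append(s[i])
--             i += 1
--     return "".join(out)
--
--
-- def _dedupe_intro(prompt: str) -> str:
--     cleaned = " ".join(prompt.strip().split())
--     for phrase in ("Ultra-realistic cinematic shot of ", "Ultra-realistic cinematic still of "):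
--         cleaned = _collapse_runs(phrase, cleaned)
--     return cleaned
-- ===== Notes on version B (the rewrite author's own statement) =====
-- stated objective: alternative
-- what changed: Replaces A's repeated-rescan fixpoint loop (`while doubled in cleaned: cleaned = cleaned.replace(...)`) with a single left-to-right scan per phrase that skips a phrase copy whenever the doubled phrase starts at the current position, collapsing any run of repeats in one pass.
import Mathlib
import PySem

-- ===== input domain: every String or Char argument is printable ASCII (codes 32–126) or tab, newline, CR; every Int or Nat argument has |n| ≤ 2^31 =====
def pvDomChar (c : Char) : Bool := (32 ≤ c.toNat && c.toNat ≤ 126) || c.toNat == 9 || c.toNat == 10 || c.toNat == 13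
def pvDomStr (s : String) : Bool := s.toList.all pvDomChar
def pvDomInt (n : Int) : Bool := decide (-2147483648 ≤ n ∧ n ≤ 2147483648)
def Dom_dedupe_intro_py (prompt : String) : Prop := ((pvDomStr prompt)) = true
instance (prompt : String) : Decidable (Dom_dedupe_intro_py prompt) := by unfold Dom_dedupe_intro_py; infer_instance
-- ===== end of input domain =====

-- B replaces A's repeated-rescan `while double in s: s = s.replace(double, phrase)` fixpoint
-- with a single left-to-right scan per phrase that skips duplicate phrase copies (objective: alternative).

-- ===== PORT A =====
-- Structural model of Python's str.replace with a nonempty pattern (d :: bt): used only to prove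
-- that one replace pass shrinks the string, which the port's `while` loop needs for termination.
def pvRepl (d : Char) (bt new : List Char) : List Char → List Char
  | [] => []
  | x :: u =>
    if (d :: bt) <+: (x :: u) then new ++ pvRepl d bt new ((x :: u).drop (d :: bt).length)
    else x :: pvRepl d bt new u
termination_by s => s.length
decreasing_by
  · simp only [List.length_cons, List.length_drop]; omega
  · simp

lemma pv_go_eq (d : Char) (bt new : List Char) :
    ∀ (fuel : Nat) (l acc : List Char), l.length ≤ fuel →
      PySem.Chars.replace.go (d :: bt) new fuel l acc = acc.reverse ++ pvRepl d bt new l := by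
  intro fuel
  induction fuel with
  | zero =>
    intro l acc h
    have hl : l = [] := List.eq_nil_of_length_eq_zero (Nat.le_zero.mp h)
    subst hl
    simp [PySem.Chars.replace.go, pvRepl]
  | succ n ih =>
    intro l acc h
    cases l with
    | nil => simp [PySem.Chars.replace.go, pvRepl]
    | cons x t =>
      by_cases hp : (d :: bt) <+: (x :: t)
      · have hb : (d :: bt).isPrefixOf (x :: t) = true := List.isPrefixOf_iff_prefix.mpr hp
        rw [show PySem.Chars.replace.go (d :: bt) new (n+1) (x :: t) acc
              = PySem.Chars.replace.go (d :: bt) new n ((x :: t).drop (d :: bt).length)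
                  (new.reverse ++ acc) by
              simp [PySem.Chars.replace.go, hb]]
        rw [ih _ _ (by simp only [List.length_drop, List.length_cons] at *; omega)]
        rw [pvRepl, if_pos hp]
        simp [List.append_assoc]
      · have hb : (d :: bt).isPrefixOf (x :: t) = false := by
          rw [← Bool.not_eq_true, List.isPrefixOf_iff_prefix]; exact hp
        rw [show PySem.Chars.replace.go (d :: bt) new (n+1) (x :: t) acc
              = PySem.Chars.replace.go (d :: bt) new n t (x :: acc) by
              simp [PySem.Chars.replace.go, hb]]
        rw [ih _ _ (by simp at h ⊢; omega)]
        rw [pvRepl, if_neg hp]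
        simp

lemma pv_replace_eq (d : Char) (bt new s : List Char) :
    PySem.Chars.replace s (d :: bt) new = pvRepl d bt new s := by
  have h := pv_go_eq d bt new s.length s [] le_rfl
  simpa [PySem.Chars.replace] using h

lemma pvRepl_length_le (d : Char) (bt new : List Char) (hnew : new.length ≤ bt.length + 1) :
    ∀ (n : Nat) (s : List Char), s.length ≤ n → (pvRepl d bt new s).length ≤ s.length := by
  intro n
  induction n with
  | zero =>
    intro s hs
    have : s = [] := List.eq_nil_of_length_eq_zero (Nat.le_zero.mp hs)
    subst this; simp [pvRepl]
  | succ n ih =>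
    intro s hs
    cases s with
    | nil => simp [pvRepl]
    | cons x u =>
      by_cases hp : (d :: bt) <+: (x :: u)
      · rw [pvRepl, if_pos hp]
        have hlen := hp.length_le
        have h1 := ih ((x :: u).drop (d :: bt).length)
          (by simp only [List.length_drop, List.length_cons] at *; omega)
        simp only [List.length_append, List.length_drop, List.length_cons] at *
        omega
      · rw [pvRepl, if_neg hp]
        have h1 := ih u (by simp at hs; omega)
        simp only [List.length_cons]; omega

lemma pvRepl_shrink (d : Char) (bt new : List Char) (hnew : new.length < bt.length + 1) :
    ∀ (n : Nat) (s : List Char), s.length ≤ n → (d :: bt) <:+: s →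
      (pvRepl d bt new s).length < s.length := by
  intro n
  induction n with
  | zero =>
    intro s hs hinf
    have : s = [] := List.eq_nil_of_length_eq_zero (Nat.le_zero.mp hs)
    subst this
    have := List.eq_nil_of_infix_nil hinf
    simp at this
  | succ n ih =>
    intro s hs hinf
    cases s with
    | nil =>
      have := List.eq_nil_of_infix_nil hinf
      simp at this
    | cons x u =>
      by_cases hp : (d :: bt) <+: (x :: u)
      · rw [pvRepl, if_pos hp]
        have hlen := hp.length_le
        have h1 := pvRepl_length_le d bt new (Nat.le_of_lt hnew) n
          ((x :: u).drop (d :: bt).length)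
          (by simp only [List.length_drop, List.length_cons] at *; omega)
        simp only [List.length_append, List.length_drop, List.length_cons] at *
        omega
      · rw [pvRepl, if_neg hp]
        have hinf' : (d :: bt) <:+: u := by
          rcases List.infix_cons_iff.mp hinf with h | h
          · exact absurd h hp
          · exact h
        have h1 := ih u (by simp at hs; omega) hinf'
        simp only [List.length_cons]; omega

lemma pv_replace_shrink (before after s : List Char) (hlen : after.length < before.length)
    (hin : PySem.Chars.isIn before s = true) :
    (PySem.Chars.replace s before after).length < s.length := by
  cases before with
  | nil => simp at hlen
  | cons d bt =>
    rw [pv_replace_eq]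
    exact pvRepl_shrink d bt after (by simpa using hlen) s.length s le_rfl
      ((PySem.Chars.isIn_iff_infix _ _).mp hin)

-- `for before, after in duplicate_pairs: while before in cleaned: cleaned = cleaned.replace(before, after)`
-- (the inner while loop; `hlen` records that the replacement is shorter, which Python's loop needs to halt)
def pvWhileA (before after : List Char) (hlen : after.length < before.length)
    (s : List Char) : List Char :=
  if hin : PySem.Chars.isIn before s then
    pvWhileA before after hlen (PySem.Chars.replace s before after)
  else s
termination_by s.length
decreasing_by exact pv_replace_shrink before after s hlen hin

-- port of A: cleaned = " ".join(prompt.strip().split()); then the loop over the two literal pairs (unrolled)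
def dedupe_intro_py (prompt : String) : String :=
  let cleaned := PySem.Chars.join " ".toList (PySem.Chars.split₀ (PySem.Chars.strip prompt.toList))
  let c1 := pvWhileA "Ultra-realistic cinematic shot of Ultra-realistic cinematic shot of ".toList
      "Ultra-realistic cinematic shot of ".toList (by decide) cleaned
  let c2 := pvWhileA "Ultra-realistic cinematic still of Ultra-realistic cinematic still of ".toList
      "Ultra-realistic cinematic still of ".toList (by decide) c1
  String.ofList c2

-- ===== PORT B =====
-- _collapse_runs(phrase, s): one left-to-right scan; when the doubled phrase starts at the current
-- position, skip one phrase copy (re-check at the kept copy), else emit the current character.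
-- The phrase is passed as head `c` and tail `tb` (phrase = c :: tb).
def pvCollapse (c : Char) (tb : List Char) : List Char → List Char
  | [] => []
  | x :: u =>
    if ((c :: tb) ++ (c :: tb)) <+: (x :: u) then
      pvCollapse c tb ((x :: u).drop (c :: tb).length)
    else x :: pvCollapse c tb u
termination_by s => s.length
decreasing_by
  · simp only [List.length_cons, List.length_drop]; omega
  · simp

-- port of B: same normalization line, then one collapse pass per phrase (loop over two literals unrolled)
def dedupe_intro_py_alt (prompt : String) : String :=
  let cleaned := PySem.Chars.join " ".toList (PySem.Chars.split₀ (PySem.Chars.strip prompt.toList))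
  let c1 := pvCollapse 'U' "ltra-realistic cinematic shot of ".toList cleaned
  let c2 := pvCollapse 'U' "ltra-realistic cinematic still of ".toList c1
  String.ofList c2

-- ===== PRECONDITION & SPEC =====
def Spec_dedupe_intro_py (prompt : String) (out : String) : Prop := out = dedupe_intro_py_alt prompt
instance (prompt : String) (out : String) : Decidable (Spec_dedupe_intro_py prompt out) := by unfold Spec_dedupe_intro_py; infer_instance

-- ===== CLAIM (what is proved, stated in full; the proofs are below) =====
def Claim_equal_dedupe_intro_py : Prop := ∀ (prompt : String), Dom_dedupe_intro_py prompt → Spec_dedupe_intro_py prompt (dedupe_intro_py prompt)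

-- ===== LEMMAS AND PROOFS =====

-- `pvReplP c tb s` = one replace-all pass of the doubled phrase by the phrase (phrase = c :: tb).
def pvReplP (c : Char) (tb : List Char) (s : List Char) : List Char :=
  pvRepl c (tb ++ (c :: tb)) (c :: tb) s

lemma pvReplP_nil (c : Char) (tb : List Char) : pvReplP c tb [] = [] := by
  simp [pvReplP, pvRepl]

lemma pvReplP_pos (c : Char) (tb : List Char) (s : List Char)
    (h : ((c :: tb) ++ (c :: tb)) <+: s) :
    pvReplP c tb s = (c :: tb) ++ pvReplP c tb (s.drop ((c :: tb) ++ (c :: tb)).length) := by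
  cases s with
  | nil => simp [List.prefix_nil] at h
  | cons x u =>
    rw [pvReplP, pvRepl]
    simp only [← List.cons_append]
    rw [if_pos h]
    rfl

lemma pvReplP_neg (c : Char) (tb : List Char) (x : Char) (u : List Char)
    (h : ¬ ((c :: tb) ++ (c :: tb)) <+: (x :: u)) :
    pvReplP c tb (x :: u) = x :: pvReplP c tb u := by
  rw [pvReplP, pvRepl]
  simp only [← List.cons_append]
  rw [if_neg h]
  rfl

lemma pvCollapse_pos (c : Char) (tb : List Char) (s : List Char)
    (h : ((c :: tb) ++ (c :: tb)) <+: s) :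
    pvCollapse c tb s = pvCollapse c tb (s.drop (c :: tb).length) := by
  cases s with
  | nil => simp [List.prefix_nil] at h
  | cons x u =>
    rw [pvCollapse]
    rw [if_pos h]

lemma pvCollapse_neg (c : Char) (tb : List Char) (x : Char) (u : List Char)
    (h : ¬ ((c :: tb) ++ (c :: tb)) <+: (x :: u)) :
    pvCollapse c tb (x :: u) = x :: pvCollapse c tb u := by
  rw [pvCollapse]
  rw [if_neg h]

-- scanning past characters that are not the phrase head changes nothing
lemma pvCollapse_walk (c : Char) (tb : List Char) :
    ∀ (t' r : List Char), (∀ y ∈ t', y ≠ c) →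
      pvCollapse c tb (t' ++ r) = t' ++ pvCollapse c tb r := by
  intro t'
  induction t' with
  | nil => simp
  | cons y t'' ih =>
    intro r hy
    have hne : ¬ ((c :: tb) ++ (c :: tb)) <+: (y :: (t'' ++ r)) := by
      intro h
      rcases List.cons_prefix_cons.mp h with ⟨hc, -⟩
      exact hy y (by simp) hc.symm
    rw [List.cons_append, pvCollapse_neg c tb _ _ hne, ih r (fun z hz => hy z (by simp [hz]))]
    rfl

lemma pvReplP_walk (c : Char) (tb : List Char) :
    ∀ (t' r : List Char), (∀ y ∈ t', y ≠ c) →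
      pvReplP c tb (t' ++ r) = t' ++ pvReplP c tb r := by
  intro t'
  induction t' with
  | nil => simp
  | cons y t'' ih =>
    intro r hy
    have hne : ¬ ((c :: tb) ++ (c :: tb)) <+: (y :: (t'' ++ r)) := by
      intro h
      rcases List.cons_prefix_cons.mp h with ⟨hc, -⟩
      exact hy y (by simp) hc.symm
    rw [List.cons_append, pvReplP_neg c tb _ _ hne, ih r (fun z hz => hy z (by simp [hz]))]
    rfl

lemma pv_doubled_prefix_iff (c : Char) (tb r : List Char) :
    ((c :: tb) ++ (c :: tb)) <+: ((c :: tb) ++ r) ↔ (c :: tb) <+: r := by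
  exact List.prefix_append_right_inj (c :: tb)

-- stepping through one full phrase copy when no second copy follows
lemma pvCollapse_P_append (c : Char) (tb : List Char) (hct : c ∉ tb) (r : List Char)
    (hr : ¬ (c :: tb) <+: r) :
    pvCollapse c tb ((c :: tb) ++ r) = (c :: tb) ++ pvCollapse c tb r := by
  have hne : ¬ ((c :: tb) ++ (c :: tb)) <+: ((c :: tb) ++ r) := by
    rw [pv_doubled_prefix_iff]; exact hr
  rw [List.cons_append, pvCollapse_neg c tb _ _ (by rw [← List.cons_append]; exact hne)]
  rw [pvCollapse_walk c tb tb r (fun y hy => by rintro rfl; exact hct hy)]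
  rfl

lemma pvReplP_P_append (c : Char) (tb : List Char) (hct : c ∉ tb) (r : List Char)
    (hr : ¬ (c :: tb) <+: r) :
    pvReplP c tb ((c :: tb) ++ r) = (c :: tb) ++ pvReplP c tb r := by
  have hne : ¬ ((c :: tb) ++ (c :: tb)) <+: ((c :: tb) ++ r) := by
    rw [pv_doubled_prefix_iff]; exact hr
  rw [List.cons_append, pvReplP_neg c tb _ _ (by rw [← List.cons_append]; exact hne)]
  rw [pvReplP_walk c tb tb r (fun y hy => by rintro rfl; exact hct hy)]
  rfl

-- a string without the doubled phrase is a fixpoint of the collapse pass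
lemma pvCollapse_id (c : Char) (tb : List Char) :
    ∀ (s : List Char), ¬ ((c :: tb) ++ (c :: tb)) <:+: s → pvCollapse c tb s = s := by
  intro s
  induction s with
  | nil => intro _; simp [pvCollapse]
  | cons x u ih =>
    intro h
    have hp : ¬ ((c :: tb) ++ (c :: tb)) <+: (x :: u) := fun hp => h hp.isInfix
    rw [pvCollapse_neg c tb x u hp, ih (fun hi => h (List.infix_cons_iff.mpr (Or.inr hi)))]

-- collapsing an extra leading phrase copy
lemma pvCollapse_PP (c : Char) (tb y : List Char) :
    pvCollapse c tb ((c :: tb) ++ ((c :: tb) ++ y)) = pvCollapse c tb ((c :: tb) ++ y) := by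
  have h : ((c :: tb) ++ (c :: tb)) <+: ((c :: tb) ++ ((c :: tb) ++ y)) := by
    rw [pv_doubled_prefix_iff]; exact List.prefix_append _ _
  rw [pvCollapse_pos c tb _ h, List.drop_left]

-- structure of one replace pass: either it agrees with the input on the first k characters,
-- or the doubled phrase occurs at some position j < k and the pass copied the input up to j verbatim
lemma pvReplP_struct (c : Char) (tb : List Char) :
    ∀ (s : List Char) (k : Nat),
      (∃ j, j < k ∧ ((c :: tb) ++ (c :: tb)) <+: s.drop j ∧
        pvReplP c tb s = s.take j ++ (c :: tb) ++
          pvReplP c tb (s.drop (j + ((c :: tb) ++ (c :: tb)).length))) ∨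
      (pvReplP c tb s).take k = s.take k := by
  intro s
  induction s with
  | nil => intro k; right; simp [pvReplP_nil]
  | cons x u ih =>
    intro k
    cases k with
    | zero => right; simp
    | succ k' =>
      by_cases hp : ((c :: tb) ++ (c :: tb)) <+: (x :: u)
      · left
        exact ⟨0, Nat.succ_pos _, by simpa using hp, by
          simpa using pvReplP_pos c tb (x :: u) hp⟩
      · rcases ih k' with ⟨j, hj, hW, heq⟩ | htake
        · left
          refine ⟨j + 1, by omega, by simpa using hW, ?_⟩
          rw [pvReplP_neg c tb x u hp, heq]
          rw [show j + 1 + ((c :: tb) ++ (c :: tb)).length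
                = (j + ((c :: tb) ++ (c :: tb)).length) + 1 from by omega]
          rw [List.drop_succ_cons, List.take_succ_cons]
          simp [List.append_assoc]
        · right
          rw [pvReplP_neg c tb x u hp]
          simp [htake]

-- one replace pass cannot create a phrase prefix
lemma pvReplP_not_prefix (c : Char) (tb : List Char) (hct : c ∉ tb) (s : List Char)
    (hs : ¬ (c :: tb) <+: s) : ¬ (c :: tb) <+: pvReplP c tb s := by
  intro hP
  rcases pvReplP_struct c tb s (c :: tb).length with ⟨j, hj, hW, heq⟩ | htake
  · rcases Nat.eq_zero_or_pos j with rfl | hjpos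
    · simp only [List.drop_zero] at hW
      exact hs ((List.prefix_append _ _).trans hW)
    · -- j > 0 : position j of the output is the phrase head c, but the prefix forces tb's char there
      have hdrop : s.drop j ≠ [] := by
        intro hnil; rw [hnil] at hW; simp [List.prefix_nil] at hW
      have hjs : j < s.length := by
        by_contra hge
        exact hdrop (List.drop_eq_nil_of_le (by omega))
      have hjtake : (s.take j).length = j := by simp; omega
      have hjlen : j < ((c :: tb) : List Char).length := hj
      have h1 : ((c :: tb) : List Char)[j] = (pvReplP c tb s)[j]'(by
          have := hP.length_le; omega) := hP.getElem hjlen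
      have h2 : (pvReplP c tb s)[j]'(by have := hP.length_le; omega) = c := by
        have : pvReplP c tb s = s.take j ++ ((c :: tb) ++
            pvReplP c tb (s.drop (j + ((c :: tb) ++ (c :: tb)).length))) := by
          rw [heq]; simp [List.append_assoc]
        rw [List.getElem_of_eq this, List.getElem_append_right (by omega)]
        simp [hjtake]
      rw [h2] at h1
      have : ((c :: tb) : List Char)[j] = tb[j - 1]'(by simp at hjlen; omega) := by
        rcases Nat.exists_eq_add_of_lt hjpos with ⟨j', rfl⟩
        simp
      rw [this] at h1
      exact hct (h1 ▸ List.getElem_mem _)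
  · have h1 : (c :: tb) = (pvReplP c tb s).take (c :: tb).length :=
      List.prefix_iff_eq_take.mp hP
    rw [htake] at h1
    exact hs (List.prefix_iff_eq_take.mpr h1)

-- main invariant: the collapse pass is unchanged by one replace pass (plain and in a phrase context)
lemma pv_psi_ctx (c : Char) (tb : List Char) (hct : c ∉ tb) :
    ∀ (n : Nat) (s : List Char), s.length ≤ n →
      (pvCollapse c tb (pvReplP c tb s) = pvCollapse c tb s) ∧
      (pvCollapse c tb ((c :: tb) ++ pvReplP c tb s) = pvCollapse c tb ((c :: tb) ++ s)) := by
  intro n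
  induction n with
  | zero =>
    intro s hs
    have : s = [] := List.eq_nil_of_length_eq_zero (Nat.le_zero.mp hs)
    subst this
    simp [pvReplP_nil]
  | succ n ih =>
    intro s hs
    have hpsi : pvCollapse c tb (pvReplP c tb s) = pvCollapse c tb s := by
      by_cases hw : ((c :: tb) ++ (c :: tb)) <+: s
      · rcases hw with ⟨u, hu⟩
        subst hu
        have hw' : ((c :: tb) ++ (c :: tb)) <+: ((c :: tb) ++ (c :: tb) ++ u) :=
          List.prefix_append _ _
        rw [pvReplP_pos c tb _ hw', List.drop_left]
        have hdrop : ((c :: tb) ++ (c :: tb) ++ u).drop ((c :: tb) : List Char).length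
            = (c :: tb) ++ u := by
          rw [List.append_assoc, List.drop_left]
        rw [pvCollapse_pos c tb _ hw', hdrop]
        exact (ih u (by simp at hs ⊢; omega)).2
      · cases s with
        | nil => simp [pvReplP_nil]
        | cons x w =>
          by_cases hp : (c :: tb) <+: (x :: w)
          · rcases hp with ⟨r, hr⟩
            rw [← hr] at hw ⊢
            have hnr : ¬ (c :: tb) <+: r := by
              intro h; exact hw ((pv_doubled_prefix_iff c tb r).mpr h)
            rw [pvReplP_P_append c tb hct r hnr]
            rw [pvCollapse_P_append c tb hct _ (pvReplP_not_prefix c tb hct r hnr)]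
            rw [pvCollapse_P_append c tb hct r hnr]
            have hrlen : r.length ≤ n := by
              have := congrArg List.length hr
              simp at this hs
              omega
            rw [(ih r hrlen).1]
          · rw [pvReplP_neg c tb x w hw]
            have hnp : ¬ ((c :: tb) ++ (c :: tb)) <+: (x :: pvReplP c tb w) := by
              intro h
              have : (c :: tb) <+: (x :: pvReplP c tb w) :=
                (List.prefix_append _ _).trans h
              rw [← pvReplP_neg c tb x w hw] at this
              exact pvReplP_not_prefix c tb hct (x :: w)
                (fun h' => hp h') this
            rw [pvCollapse_neg c tb _ _ hnp]
            rw [(ih w (by simp at hs; omega)).1]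
            rw [pvCollapse_neg c tb x w hw]
    refine ⟨hpsi, ?_⟩
    by_cases hw : ((c :: tb) ++ (c :: tb)) <+: s
    · rcases hw with ⟨u, hu⟩
      subst hu
      have hw' : ((c :: tb) ++ (c :: tb)) <+: ((c :: tb) ++ (c :: tb) ++ u) :=
        List.prefix_append _ _
      rw [pvReplP_pos c tb _ hw', List.drop_left]
      rw [pvCollapse_PP c tb]
      rw [(ih u (by simp at hs ⊢; omega)).2]
      rw [show (c :: tb) ++ ((c :: tb) ++ (c :: tb) ++ u)
            = (c :: tb) ++ ((c :: tb) ++ ((c :: tb) ++ u)) by simp [List.append_assoc]]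
      rw [pvCollapse_PP c tb, pvCollapse_PP c tb]
    · cases s with
      | nil => simp [pvReplP_nil]
      | cons x w =>
        by_cases hp : (c :: tb) <+: (x :: w)
        · rcases hp with ⟨r, hr⟩
          rw [← hr] at hw ⊢
          have hnr : ¬ (c :: tb) <+: r := by
            intro h; exact hw ((pv_doubled_prefix_iff c tb r).mpr h)
          rw [pvReplP_P_append c tb hct r hnr]
          rw [pvCollapse_PP c tb, pvCollapse_PP c tb]
          have hrlen : r.length ≤ n := by
            have := congrArg List.length hr
            simp at this hs
            omega
          exact (ih r hrlen).2
        · have hnp := pvReplP_not_prefix c tb hct (x :: w) hp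
          rw [pvCollapse_P_append c tb hct _ hnp]
          rw [pvCollapse_P_append c tb hct _ hp]
          rw [hpsi]

-- A's fixpoint loop equals B's single collapse pass
lemma pv_fixcol (c : Char) (tb : List Char) (hct : c ∉ tb)
    (hlen : ((c :: tb) : List Char).length < (((c :: tb) ++ (c :: tb)) : List Char).length) :
    ∀ (n : Nat) (s : List Char), s.length ≤ n →
      pvWhileA ((c :: tb) ++ (c :: tb)) (c :: tb) hlen s = pvCollapse c tb s := by
  intro n
  induction n with
  | zero =>
    intro s hs
    have : s = [] := List.eq_nil_of_length_eq_zero (Nat.le_zero.mp hs)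
    subst this
    rw [pvWhileA]
    have hfalse : PySem.Chars.isIn ((c :: tb) ++ (c :: tb)) [] = false := by
      rw [PySem.Chars.isIn_eq_false_iff]
      intro h
      have := List.eq_nil_of_infix_nil h
      simp at this
    rw [dif_neg (by simp only [Bool.not_eq_true]; exact hfalse)]
    simp [pvCollapse]
  | succ n ih =>
    intro s hs
    rw [pvWhileA]
    by_cases hin : PySem.Chars.isIn ((c :: tb) ++ (c :: tb)) s = true
    · rw [dif_pos hin]
      have hrepl : PySem.Chars.replace s ((c :: tb) ++ (c :: tb)) (c :: tb)
          = pvReplP c tb s := pv_replace_eq c (tb ++ (c :: tb)) (c :: tb) s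
      rw [hrepl]
      have hshrink : (pvReplP c tb s).length < s.length := by
        rw [← hrepl]
        exact pv_replace_shrink _ _ s (by simp) hin
      rw [ih (pvReplP c tb s) (by omega)]
      exact (pv_psi_ctx c tb hct s.length s le_rfl).1
    · rw [dif_neg hin]
      rw [pvCollapse_id c tb s (by
        intro h
        exact hin ((PySem.Chars.isIn_iff_infix _ _).mpr h))]

-- the two concrete phrases: doubled literal = phrase ++ phrase, phrase = head 'U' :: tail, 'U' not in tail
lemma pv_phrase1 (s : List Char) :
    pvWhileA "Ultra-realistic cinematic shot of Ultra-realistic cinematic shot of ".toList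
      "Ultra-realistic cinematic shot of ".toList (by decide) s
      = pvCollapse 'U' "ltra-realistic cinematic shot of ".toList s :=
  pv_fixcol 'U' "ltra-realistic cinematic shot of ".toList (by decide) (by decide) s.length s le_rfl

lemma pv_phrase2 (s : List Char) :
    pvWhileA "Ultra-realistic cinematic still of Ultra-realistic cinematic still of ".toList
      "Ultra-realistic cinematic still of ".toList (by decide) s
      = pvCollapse 'U' "ltra-realistic cinematic still of ".toList s :=
  pv_fixcol 'U' "ltra-realistic cinematic still of ".toList (by decide) (by decide) s.length s le_rfl

-- ===== VERDICT (by name: the statement is the Claim_ definition above) =====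
theorem dedupe_intro_py_spec : Claim_equal_dedupe_intro_py := by
  intro prompt _
  unfold Spec_dedupe_intro_py dedupe_intro_py dedupe_intro_py_alt
  simp only []
  rw [pv_phrase1, pv_phrase2]
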